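-- pv_equiv track=rewrite | github.com/valentinfoucher/kaggle-kore | kore-python/agents/miner6.py | process_flight_plan
-- ===== SOURCE A (Python) =====
-- def process_direction(pos, direction):
--     (x, y) = pos
--     if direction == 'N':
--         return (x, (y+1) % 21)
--     if direction == 'S':
--         return (x, (y-1) % 21)
--     if direction == 'E':
--         return ((x+1) % 21, y)
--     else:
--         return ((x-1) % 21, y)
--
-- def process_flight_plan(pos_start, flight_plan):
--     (x_start, y_start) = pos_start
--     route = []
--     current_dir = flight_plan[0]
--     current_pos = process_direction((x_start, y_start), current_dir)
--     route.append(current_pos)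
--     for instruction in flight_plan[1:]:
--         if instruction in ['N', 'S', 'E', 'W']:
--             current_dir = instruction
--             current_pos = process_direction(current_pos, current_dir)
--             route.append(current_pos)
--         else:
--             for i in range(int(instruction)):
--                 current_pos = process_direction(current_pos, current_dir)
--                 route.append(current_pos)
--     return route
-- ===== SOURCE B (Python) =====
-- def process_flight_plan(pos_start, flight_plan):
--     # Phase 1: expand the plan into one direction token per step.
--     steps = [flight_plan[0]]
--     current = flight_plan[0]
--     for tok in flight_plan[1:]:
--         if tok in 'NSEW':
--             steps.append(tok)
--             current = tok
--         else:
--             steps.extend([current] * int(tok))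
--     # Phase 2: fold the step list over the start position, collecting positions.
--     (x, y) = pos_start
--     route = []
--     for d in steps:
--         if d == 'N':
--             y = (y + 1) % 21
--         elif d == 'S':
--             y = (y - 1) % 21
--         elif d == 'E':
--             x = (x + 1) % 21
--         else:
--             x = (x - 1) % 21
--         route.append((x, y))
--     return route
-- ===== Notes on version B (the rewrite author's own statement) =====
-- stated objective: alternative
-- what changed: A interleaves direction-switching, repeat-count expansion and movement in one stateful loop with a nested range loop; B first expands the plan into a flat list of one direction token per step, then folds that list over the start position to collect the route.
import Mathlib
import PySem

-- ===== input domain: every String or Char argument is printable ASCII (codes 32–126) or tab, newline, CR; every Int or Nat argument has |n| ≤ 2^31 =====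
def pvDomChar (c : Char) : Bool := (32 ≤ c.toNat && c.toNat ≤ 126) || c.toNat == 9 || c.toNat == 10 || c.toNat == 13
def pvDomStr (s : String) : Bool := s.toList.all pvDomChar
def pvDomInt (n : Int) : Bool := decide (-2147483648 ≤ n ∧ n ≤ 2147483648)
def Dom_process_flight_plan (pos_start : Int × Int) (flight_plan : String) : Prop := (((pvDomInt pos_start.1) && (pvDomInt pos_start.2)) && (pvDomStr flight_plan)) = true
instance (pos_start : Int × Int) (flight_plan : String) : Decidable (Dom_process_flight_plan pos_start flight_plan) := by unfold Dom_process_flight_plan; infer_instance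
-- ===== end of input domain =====

-- B replaces A's interleaved state machine by two phases (expand plan to one token per step, then fold moves); same values, alternative decomposition.

-- ===== PORT A =====
def process_direction (pos : Int × Int) (direction : Char) : Int × Int :=
  let (x, y) := pos
  if direction = 'N' then (x, PySem.Int.mod (y + 1) 21)
  else if direction = 'S' then (x, PySem.Int.mod (y - 1) 21)
  else if direction = 'E' then (PySem.Int.mod (x + 1) 21, y)
  else (PySem.Int.mod (x - 1) 21, y)

-- inner loop: for i in range(int(instruction))
def pfpRep (n : Nat) (d : Char) (pos : Int × Int) (route : List (Int × Int)) :
    (Int × Int) × List (Int × Int) :=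
  match n with
  | 0 => (pos, route)
  | n + 1 =>
    let p := process_direction pos d
    pfpRep n d p (route ++ [p])

-- outer loop over flight_plan[1:]
def pfpLoop (rest : List Char) (dir : Char) (pos : Int × Int) (route : List (Int × Int)) :
    List (Int × Int) :=
  match rest with
  | [] => route
  | c :: cs =>
    if c = 'N' ∨ c = 'S' ∨ c = 'E' ∨ c = 'W' then
      let p := process_direction pos c
      pfpLoop cs c p (route ++ [p])
    else
      let n := ((PySem.Int.ofChars? [c]).getD 0).toNat   -- int(instruction); Pre_ excludes the raising case
      let pr := pfpRep n dir pos route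
      pfpLoop cs dir pr.1 pr.2

def process_flight_plan (pos_start : Int × Int) (flight_plan : String) : List (Int × Int) :=
  match flight_plan.toList with
  | [] => []   -- Python raises IndexError here; excluded by Pre_
  | d :: rest =>
    let p := process_direction pos_start d
    pfpLoop rest d p [p]

-- ===== PORT B =====
-- Phase 1: expand flight_plan[1:] into one direction token per step
def pfpExpand (rest : List Char) (current : Char) : List Char :=
  match rest with
  | [] => []
  | c :: cs =>
    if c = 'N' ∨ c = 'S' ∨ c = 'E' ∨ c = 'W' then c :: pfpExpand cs c
    else List.replicate ((PySem.Int.ofChars? [c]).getD 0).toNat current ++ pfpExpand cs current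

def pfpStep (x y : Int) (d : Char) : Int × Int :=
  if d = 'N' then (x, PySem.Int.mod (y + 1) 21)
  else if d = 'S' then (x, PySem.Int.mod (y - 1) 21)
  else if d = 'E' then (PySem.Int.mod (x + 1) 21, y)
  else (PySem.Int.mod (x - 1) 21, y)

-- Phase 2: fold the step list over the start position, collecting positions
def pfpWalk (steps : List Char) (x y : Int) : List (Int × Int) :=
  match steps with
  | [] => []
  | d :: ds =>
    let p := pfpStep x y d
    p :: pfpWalk ds p.1 p.2

def process_flight_plan_alt (pos_start : Int × Int) (flight_plan : String) : List (Int × Int) :=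
  match flight_plan.toList with
  | [] => []   -- Python raises IndexError here; excluded by Pre_
  | c :: cs => pfpWalk (c :: pfpExpand cs c) pos_start.1 pos_start.2

-- ===== PRECONDITION & SPEC =====
-- Pre_ excludes exactly the inputs where Python A raises: the empty plan (IndexError) and
-- plans whose tail has a character that is neither a direction letter nor a decimal digit (ValueError from int()).
def pvPlanTok (c : Char) : Bool := c == 'N' || c == 'S' || c == 'E' || c == 'W' || c.isDigit
def Pre_process_flight_plan (pos_start : Int × Int) (flight_plan : String) : Prop :=
  flight_plan.toList ≠ [] ∧ flight_plan.toList.tail.all pvPlanTok = true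
instance (pos_start : Int × Int) (flight_plan : String) : Decidable (Pre_process_flight_plan pos_start flight_plan) := by unfold Pre_process_flight_plan; infer_instance

def pvWitness_process_flight_plan : (Int × Int) × String := ((3, 20), "N2E3S")

def Spec_process_flight_plan (pos_start : Int × Int) (flight_plan : String) (out : List (Int × Int)) : Prop := out = process_flight_plan_alt pos_start flight_plan
instance (pos_start : Int × Int) (flight_plan : String) (out : List (Int × Int)) : Decidable (Spec_process_flight_plan pos_start flight_plan out) := by unfold Spec_process_flight_plan; infer_instance

-- ===== CLAIM (what is proved, stated in full; the proofs are below) =====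
def Claim_equal_process_flight_plan : Prop := ∀ (pos_start : Int × Int) (flight_plan : String), Dom_process_flight_plan pos_start flight_plan → Pre_process_flight_plan pos_start flight_plan → Spec_process_flight_plan pos_start flight_plan (process_flight_plan pos_start flight_plan)

-- ===== LEMMAS AND PROOFS =====

theorem pfpStep_eq (p : Int × Int) (d : Char) : pfpStep p.1 p.2 d = process_direction p d := by
  obtain ⟨x, y⟩ := p; rfl

-- position reached after walking a token list (matches pfpWalk's running position)
def pfpEnd (l : List Char) (p : Int × Int) : Int × Int :=
  l.foldl (fun q d => pfpStep q.1 q.2 d) p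

theorem pfpWalk_append (l1 l2 : List Char) (x y : Int) :
    pfpWalk (l1 ++ l2) x y =
      pfpWalk l1 x y ++ pfpWalk l2 (pfpEnd l1 (x, y)).1 (pfpEnd l1 (x, y)).2 := by
  induction l1 generalizing x y with
  | nil => simp [pfpWalk, pfpEnd]
  | cons d ds ih => simp [pfpWalk, pfpEnd, List.foldl_cons, ih]

theorem pfpEnd_replicate (n : Nat) (d : Char) (p : Int × Int) :
    pfpEnd (List.replicate n d) p = (fun q => process_direction q d)^[n] p := by
  induction n generalizing p with
  | zero => simp [pfpEnd]
  | succ n ih =>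
    rw [List.replicate_succ, Function.iterate_succ_apply]
    simpa [pfpEnd, pfpStep_eq] using ih (process_direction p d)

theorem pfpRep_eq (n : Nat) (d : Char) (p : Int × Int) (r : List (Int × Int)) :
    pfpRep n d p r =
      ((fun q => process_direction q d)^[n] p,
        r ++ pfpWalk (List.replicate n d) p.1 p.2) := by
  induction n generalizing p r with
  | zero => simp [pfpRep, pfpWalk]
  | succ n ih =>
    rw [pfpRep, ih, Function.iterate_succ_apply, List.replicate_succ]
    simp [pfpWalk, pfpStep_eq]

theorem pfpLoop_eq (rest : List Char) (dir : Char) (p : Int × Int) (r : List (Int × Int)) :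
    pfpLoop rest dir p r = r ++ pfpWalk (pfpExpand rest dir) p.1 p.2 := by
  induction rest generalizing dir p r with
  | nil => simp [pfpLoop, pfpExpand, pfpWalk]
  | cons c cs ih =>
    by_cases h : c = 'N' ∨ c = 'S' ∨ c = 'E' ∨ c = 'W'
    · simp only [pfpLoop, pfpExpand, if_pos h]
      rw [ih]
      simp [pfpWalk, pfpStep_eq]
    · simp only [pfpLoop, pfpExpand, if_neg h]
      rw [pfpRep_eq, ih, pfpWalk_append, pfpEnd_replicate]
      simp

theorem process_flight_plan_eq_alt (pos_start : Int × Int) (flight_plan : String) :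
    process_flight_plan pos_start flight_plan = process_flight_plan_alt pos_start flight_plan := by
  rw [process_flight_plan, process_flight_plan_alt]
  cases h : flight_plan.toList with
  | nil => rfl
  | cons d rest =>
    simp only []
    rw [pfpLoop_eq, pfpWalk]
    simp [pfpStep_eq]

-- ===== VERDICT (by name: the statement is the Claim_ definition above) =====
theorem process_flight_plan_spec : Claim_equal_process_flight_plan := by
  intro pos_start flight_plan _ _
  unfold Spec_process_flight_plan
  exact process_flight_plan_eq_alt pos_start flight_plan
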